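-- pv_equiv track=rewrite | github.com/shawnghu/p_euler | 90.py | can_do_the_thing
-- ===== SOURCE A (Python) =====
-- squares = ['01', '04', '09', '16', '25', '36', '49', '64', '81']
--
-- def digit_on_die(digit, die):
--     # return digit in die
--     if digit == '9' or digit == '6':
--         return '9' in die or '6' in die
--     else:
--         return digit in die
--
-- def can_do_the_thing(die_a, die_b):
--     for square in squares:
--         digit_1 = square[0]
--         digit_2 = square[1]
--         can_make_this_square = False
--         if digit_on_die(digit_1, die_a) and digit_on_die(digit_2, die_b):
--             can_make_this_square = True
--         if digit_on_die(digit_2, die_a) and digit_on_die(digit_1, die_b):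
--             can_make_this_square = True
--         if not can_make_this_square:
--             return False
--     return True
-- ===== SOURCE B (Python) =====
-- # Inverted traversal: instead of scanning the 9 squares and searching both dice for
-- # each, reduce each die to its relevant normalized faces, then walk those face pairs
-- # once, marking the squares each pair can display; succeed iff all 9 got marked.
-- _PAIR_SQUARES = {
--     ('0', '1'): {0}, ('1', '0'): {0},
--     ('0', '4'): {1}, ('4', '0'): {1},
--     ('0', '6'): {2}, ('6', '0'): {2},
--     ('1', '6'): {3}, ('6', '1'): {3},
--     ('2', '5'): {4}, ('5', '2'): {4},
--     ('3', '6'): {5}, ('6', '3'): {5},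
--     ('4', '6'): {6, 7}, ('6', '4'): {6, 7},
--     ('8', '1'): {8}, ('1', '8'): {8},
-- }
-- _RELEVANT = {'0', '1', '2', '3', '4', '5', '6', '8'}
-- _ALL_SQUARES = set(range(9))
--
-- def _norm(die):
--     # the die's faces with 9 flipped to 6, pruned to digits that occur in a square
--     return {'6' if f == '9' else f for f in die} & _RELEVANT
--
-- def can_do_the_thing(die_a, die_b):
--     na = _norm(die_a)
--     nb = _norm(die_b)
--     covered = set()
--     for x in na:
--         for y in nb:
--             covered |= _PAIR_SQUARES.get((x, y), set())
--     return covered == _ALL_SQUARES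
-- ===== Notes on version B (the rewrite author's own statement) =====
-- stated objective: alternative
-- what changed: B inverts the traversal: instead of scanning the 9 squares and searching both dice for each digit, it walks the cartesian product of the two dice's 6/9-normalized faces once, accumulating the set of square indices each face pair can display (via a pair->squares table), and succeeds iff all 9 indices got marked.
import Mathlib
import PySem

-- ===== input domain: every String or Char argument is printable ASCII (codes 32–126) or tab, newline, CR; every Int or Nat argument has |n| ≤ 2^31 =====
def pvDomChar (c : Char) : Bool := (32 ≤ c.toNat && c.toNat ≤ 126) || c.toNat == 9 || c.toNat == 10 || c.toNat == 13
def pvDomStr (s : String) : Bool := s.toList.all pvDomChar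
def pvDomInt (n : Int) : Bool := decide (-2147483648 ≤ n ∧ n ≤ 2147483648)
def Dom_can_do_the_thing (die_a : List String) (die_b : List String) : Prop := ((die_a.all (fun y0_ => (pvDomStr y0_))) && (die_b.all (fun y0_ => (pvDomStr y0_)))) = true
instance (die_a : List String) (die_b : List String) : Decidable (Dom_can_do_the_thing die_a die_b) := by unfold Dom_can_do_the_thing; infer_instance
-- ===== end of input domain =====

-- B inverts A's traversal: instead of scanning the 9 squares and searching both dice
-- for each, it walks the face pairs of the two dice once, marking the squares each
-- (6/9-normalized) pair can display, and succeeds iff all 9 got marked (objective: alternative).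

-- ===== PORT A =====
def squaresA : List String := ["01", "04", "09", "16", "25", "36", "49", "64", "81"]

def digit_on_die (digit : String) (die : List String) : Bool :=
  if digit == "9" || digit == "6" then die.contains "9" || die.contains "6"
  else die.contains digit

def canLoopA (die_a : List String) (die_b : List String) : List String → Bool
  | [] => true
  | square :: rest =>
    -- square[0] / square[1]: every literal in squaresA has length 2, so pyGet? is some
    match PySem.Str.pyGet? square 0, PySem.Str.pyGet? square 1 with
    | some c1, some c2 =>
      let digit_1 := String.ofList [c1]
      let digit_2 := String.ofList [c2]
      let can_make_this_square := false
      let can_make_this_square :=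
        if digit_on_die digit_1 die_a && digit_on_die digit_2 die_b then true
        else can_make_this_square
      let can_make_this_square :=
        if digit_on_die digit_2 die_a && digit_on_die digit_1 die_b then true
        else can_make_this_square
      if !can_make_this_square then false else canLoopA die_a die_b rest
    | _, _ => false

def can_do_the_thing (die_a : List String) (die_b : List String) : Bool :=
  canLoopA die_a die_b squaresA

-- ===== PORT B =====
-- the dict literal _PAIR_SQUARES: normalized ordered face pair -> set of square indices it displays
def pairSquaresB : PySem.Dict (String × String) (List Int) :=
  PySem.Dict.mk
    [(("0","1"),[0]), (("1","0"),[0]),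
     (("0","4"),[1]), (("4","0"),[1]),
     (("0","6"),[2]), (("6","0"),[2]),
     (("1","6"),[3]), (("6","1"),[3]),
     (("2","5"),[4]), (("5","2"),[4]),
     (("3","6"),[5]), (("6","3"),[5]),
     (("4","6"),[6,7]), (("6","4"),[6,7]),
     (("8","1"),[8]), (("1","8"),[8])]

-- _RELEVANT
def relevantB : List String := ["0", "1", "2", "3", "4", "5", "6", "8"]

-- _ALL_SQUARES = set(range(9))
def allSquaresB : PySem.Set Int := PySem.Set.ofList (PySem.List.pyRange 0 9 1)

-- _norm(die)
def normB (die : List String) : PySem.Set String :=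
  PySem.Set.inter (PySem.Set.ofList (die.map fun f => if f == "9" then "6" else f)) relevantB

def can_do_the_thing_alt (die_a : List String) (die_b : List String) : Bool :=
  let na := normB die_a
  let nb := normB die_b
  let covered : PySem.Set Int :=
    na.foldl (fun covered x =>
      nb.foldl (fun covered y =>
        PySem.Set.union covered (PySem.Dict.getD pairSquaresB (x, y) [])) covered)
      PySem.Set.empty
  PySem.Set.equal covered allSquaresB

-- ===== PRECONDITION & SPEC =====
def Spec_can_do_the_thing (die_a : List String) (die_b : List String) (out : Bool) : Prop := out = can_do_the_thing_alt die_a die_b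
instance (die_a : List String) (die_b : List String) (out : Bool) : Decidable (Spec_can_do_the_thing die_a die_b out) := by unfold Spec_can_do_the_thing; infer_instance

-- ===== CLAIM (what is proved, stated in full; the proofs are below) =====
def Claim_equal_can_do_the_thing : Prop := ∀ (die_a : List String) (die_b : List String), Dom_can_do_the_thing die_a die_b → Spec_can_do_the_thing die_a die_b (can_do_the_thing die_a die_b)

-- ===== LEMMAS AND PROOFS =====

-- "the normalized face pair (x, y) can show square j", spelled through the dict
def hits (j : Int) (x y : String) : Prop :=
  j ∈ PySem.Dict.getD pairSquaresB (x, y) []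

lemma mem_getD_pairs (k : String × String) (i : Int) :
    (i ∈ PySem.Dict.getD pairSquaresB k []) ↔ ∃ v, (k, v) ∈ pairSquaresB.items ∧ i ∈ v := by
  have nd : pairSquaresB.keys.Nodup := by decide
  rw [PySem.Dict.getD_eq_get?_getD]
  cases h : pairSquaresB.get? k with
  | none =>
    simp only [Option.getD_none, List.not_mem_nil, false_iff]
    rintro ⟨v, hv, -⟩
    exact absurd (PySem.Dict.get?_of_mem_items pairSquaresB hv nd) (by simp [h])
  | some v =>
    simp only [Option.getD_some]
    rw [PySem.Dict.get?_eq_some_iff_mem_items pairSquaresB k v nd] at h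
    constructor
    · intro hi; exact ⟨v, h, hi⟩
    · rintro ⟨w, hw, hi⟩
      have h1 := PySem.Dict.get?_of_mem_items pairSquaresB hw nd
      have h2 := PySem.Dict.get?_of_mem_items pairSquaresB h nd
      rw [h1] at h2; cases h2; exact hi

lemma getD_pairs_sub (k : String × String) (i : Int)
    (h : i ∈ PySem.Dict.getD pairSquaresB k []) : 0 ≤ i ∧ i ≤ 8 := by
  rw [mem_getD_pairs] at h
  obtain ⟨v, hv, hi⟩ := h
  simp [pairSquaresB, Prod.ext_iff] at hv
  aesop

lemma inner_mem (nb : List String) (x : String) (cov : PySem.Set Int) (i : Int) :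
    (i ∈ nb.foldl (fun covered y =>
        PySem.Set.union covered (PySem.Dict.getD pairSquaresB (x, y) [])) cov) ↔
      i ∈ cov ∨ ∃ y ∈ nb, hits i x y := by
  induction nb generalizing cov with
  | nil => simp
  | cons y t ih =>
    rw [List.foldl_cons, ih, PySem.Set.mem_union]
    simp only [List.exists_mem_cons_iff, hits]
    exact or_assoc

lemma outer_mem (na nb : List String) (cov : PySem.Set Int) (i : Int) :
    (i ∈ na.foldl (fun covered x =>
        nb.foldl (fun covered y =>
          PySem.Set.union covered (PySem.Dict.getD pairSquaresB (x, y) [])) covered) cov) ↔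
      i ∈ cov ∨ ∃ x ∈ na, ∃ y ∈ nb, hits i x y := by
  induction na generalizing cov with
  | nil => simp
  | cons x t ih =>
    rw [List.foldl_cons, ih, inner_mem]
    simp only [List.exists_mem_cons_iff]
    exact or_assoc

lemma mem_norm (l : List String) (d : String) (h6 : d ≠ "6") (h9 : d ≠ "9")
    (hrel : d ∈ relevantB) : (d ∈ normB l) ↔ d ∈ l := by
  simp only [normB, PySem.Set.mem_inter, PySem.Set.mem_ofList, List.mem_map, hrel, and_true]
  constructor
  · rintro ⟨f, hf, rfl⟩
    split at h6 <;> simp_all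
  · intro hd
    exact ⟨d, hd, by split <;> simp_all⟩

lemma mem_norm_six (l : List String) : ("6" ∈ normB l) ↔ ("9" ∈ l ∨ "6" ∈ l) := by
  simp only [normB, PySem.Set.mem_inter, PySem.Set.mem_ofList, List.mem_map,
    show ("6" : String) ∈ relevantB from by decide, and_true]
  constructor
  · rintro ⟨f, hf, hfe⟩
    by_cases h : f = "9" <;> simp_all
  · rintro (h | h)
    · exact ⟨"9", h, by decide⟩
    · exact ⟨"6", h, by decide⟩

-- the per-index key characterizations of the dict
lemma hits0 (p q : String) : (0 ∈ PySem.Dict.getD pairSquaresB (p,q) []) ↔ ((p = "0" ∧ q = "1") ∨ (p = "1" ∧ q = "0")) := by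
  rw [mem_getD_pairs]; simp [pairSquaresB, Prod.ext_iff]; aesop
lemma hits1 (p q : String) : (1 ∈ PySem.Dict.getD pairSquaresB (p,q) []) ↔ ((p = "0" ∧ q = "4") ∨ (p = "4" ∧ q = "0")) := by
  rw [mem_getD_pairs]; simp [pairSquaresB, Prod.ext_iff]; aesop
lemma hits2 (p q : String) : (2 ∈ PySem.Dict.getD pairSquaresB (p,q) []) ↔ ((p = "0" ∧ q = "6") ∨ (p = "6" ∧ q = "0")) := by
  rw [mem_getD_pairs]; simp [pairSquaresB, Prod.ext_iff]; aesop
lemma hits3 (p q : String) : (3 ∈ PySem.Dict.getD pairSquaresB (p,q) []) ↔ ((p = "1" ∧ q = "6") ∨ (p = "6" ∧ q = "1")) := by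
  rw [mem_getD_pairs]; simp [pairSquaresB, Prod.ext_iff]; aesop
lemma hits4 (p q : String) : (4 ∈ PySem.Dict.getD pairSquaresB (p,q) []) ↔ ((p = "2" ∧ q = "5") ∨ (p = "5" ∧ q = "2")) := by
  rw [mem_getD_pairs]; simp [pairSquaresB, Prod.ext_iff]; aesop
lemma hits5 (p q : String) : (5 ∈ PySem.Dict.getD pairSquaresB (p,q) []) ↔ ((p = "3" ∧ q = "6") ∨ (p = "6" ∧ q = "3")) := by
  rw [mem_getD_pairs]; simp [pairSquaresB, Prod.ext_iff]; aesop
lemma hits6 (p q : String) : (6 ∈ PySem.Dict.getD pairSquaresB (p,q) []) ↔ ((p = "4" ∧ q = "6") ∨ (p = "6" ∧ q = "4")) := by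
  rw [mem_getD_pairs]; simp [pairSquaresB, Prod.ext_iff]; aesop
lemma hits7 (p q : String) : (7 ∈ PySem.Dict.getD pairSquaresB (p,q) []) ↔ ((p = "4" ∧ q = "6") ∨ (p = "6" ∧ q = "4")) := by
  rw [mem_getD_pairs]; simp [pairSquaresB, Prod.ext_iff]; aesop
lemma hits8 (p q : String) : (8 ∈ PySem.Dict.getD pairSquaresB (p,q) []) ↔ ((p = "8" ∧ q = "1") ∨ (p = "1" ∧ q = "8")) := by
  rw [mem_getD_pairs]; simp [pairSquaresB, Prod.ext_iff]; aesop

lemma split2 {α : Type} (da db : List α) (P Q : α → Prop) :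
    (∃ x ∈ da, ∃ y ∈ db, (P x ∧ Q y) ∨ (Q x ∧ P y)) ↔
      ((∃ x ∈ da, P x) ∧ (∃ y ∈ db, Q y)) ∨ ((∃ x ∈ da, Q x) ∧ (∃ y ∈ db, P y)) := by
  constructor
  · rintro ⟨x, hx, y, hy, (⟨h1, h2⟩ | ⟨h1, h2⟩)⟩
    · exact Or.inl ⟨⟨x, hx, h1⟩, ⟨y, hy, h2⟩⟩
    · exact Or.inr ⟨⟨x, hx, h1⟩, ⟨y, hy, h2⟩⟩
  · rintro (⟨⟨x, hx, h1⟩, ⟨y, hy, h2⟩⟩ | ⟨⟨x, hx, h1⟩, ⟨y, hy, h2⟩⟩)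
    · exact ⟨x, hx, y, hy, Or.inl ⟨h1, h2⟩⟩
    · exact ⟨x, hx, y, hy, Or.inr ⟨h1, h2⟩⟩

lemma ifHelp1 (b r : Bool) : (if b = false then false else r) = (b && r) := by
  cases b <;> simp

lemma ifHelp2 (p q : Prop) [Decidable p] [Decidable q] :
    (if p then true else if q then true else false) = (decide p || decide q) := by
  by_cases p <;> by_cases q <;> simp_all

set_option maxHeartbeats 1000000 in
lemma A_iff (da db : List String) : can_do_the_thing da db = true ↔
    ((("0" ∈ da ∧ "1" ∈ db) ∨ ("1" ∈ da ∧ "0" ∈ db)) ∧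
     (("0" ∈ da ∧ "4" ∈ db) ∨ ("4" ∈ da ∧ "0" ∈ db)) ∧
     (("0" ∈ da ∧ ("9" ∈ db ∨ "6" ∈ db)) ∨ (("9" ∈ da ∨ "6" ∈ da) ∧ "0" ∈ db)) ∧
     (("1" ∈ da ∧ ("9" ∈ db ∨ "6" ∈ db)) ∨ (("9" ∈ da ∨ "6" ∈ da) ∧ "1" ∈ db)) ∧
     (("2" ∈ da ∧ "5" ∈ db) ∨ ("5" ∈ da ∧ "2" ∈ db)) ∧
     (("3" ∈ da ∧ ("9" ∈ db ∨ "6" ∈ db)) ∨ (("9" ∈ da ∨ "6" ∈ da) ∧ "3" ∈ db)) ∧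
     (("4" ∈ da ∧ ("9" ∈ db ∨ "6" ∈ db)) ∨ (("9" ∈ da ∨ "6" ∈ da) ∧ "4" ∈ db)) ∧
     ((("9" ∈ da ∨ "6" ∈ da) ∧ "4" ∈ db) ∨ ("4" ∈ da ∧ ("9" ∈ db ∨ "6" ∈ db))) ∧
     (("8" ∈ da ∧ "1" ∈ db) ∨ ("1" ∈ da ∧ "8" ∈ db))) := by
  simp only [can_do_the_thing, squaresA, canLoopA,
    show PySem.Str.pyGet? "01" 0 = some '0' from rfl,
    show PySem.Str.pyGet? "01" 1 = some '1' from rfl,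
    show PySem.Str.pyGet? "04" 0 = some '0' from rfl,
    show PySem.Str.pyGet? "04" 1 = some '4' from rfl,
    show PySem.Str.pyGet? "09" 0 = some '0' from rfl,
    show PySem.Str.pyGet? "09" 1 = some '9' from rfl,
    show PySem.Str.pyGet? "16" 0 = some '1' from rfl,
    show PySem.Str.pyGet? "16" 1 = some '6' from rfl,
    show PySem.Str.pyGet? "25" 0 = some '2' from rfl,
    show PySem.Str.pyGet? "25" 1 = some '5' from rfl,
    show PySem.Str.pyGet? "36" 0 = some '3' from rfl,
    show PySem.Str.pyGet? "36" 1 = some '6' from rfl,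
    show PySem.Str.pyGet? "49" 0 = some '4' from rfl,
    show PySem.Str.pyGet? "49" 1 = some '9' from rfl,
    show PySem.Str.pyGet? "64" 0 = some '6' from rfl,
    show PySem.Str.pyGet? "64" 1 = some '4' from rfl,
    show PySem.Str.pyGet? "81" 0 = some '8' from rfl,
    show PySem.Str.pyGet? "81" 1 = some '1' from rfl,
    show String.ofList ['0'] = "0" from rfl,
    show String.ofList ['1'] = "1" from rfl,
    show String.ofList ['2'] = "2" from rfl,
    show String.ofList ['3'] = "3" from rfl,
    show String.ofList ['4'] = "4" from rfl,
    show String.ofList ['5'] = "5" from rfl,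
    show String.ofList ['6'] = "6" from rfl,
    show String.ofList ['8'] = "8" from rfl,
    show String.ofList ['9'] = "9" from rfl]
  simp only [digit_on_die, List.contains_eq_mem]
  simp only [ifHelp1, ifHelp2, Bool.and_eq_true, Bool.or_eq_true, Bool.not_eq_true',
    decide_eq_true_eq, beq_iff_eq, String.reduceEq, or_self, or_false, false_or,
    if_true, if_false, Bool.and_true]
  exact and_congr or_comm (and_congr or_comm (and_congr or_comm (and_congr or_comm
    (and_congr or_comm (and_congr or_comm (and_congr or_comm (and_congr or_comm or_comm)))))))

lemma B_iff (da db : List String) : can_do_the_thing_alt da db = true ↔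
    ((("0" ∈ da ∧ "1" ∈ db) ∨ ("1" ∈ da ∧ "0" ∈ db)) ∧
     (("0" ∈ da ∧ "4" ∈ db) ∨ ("4" ∈ da ∧ "0" ∈ db)) ∧
     (("0" ∈ da ∧ ("9" ∈ db ∨ "6" ∈ db)) ∨ (("9" ∈ da ∨ "6" ∈ da) ∧ "0" ∈ db)) ∧
     (("1" ∈ da ∧ ("9" ∈ db ∨ "6" ∈ db)) ∨ (("9" ∈ da ∨ "6" ∈ da) ∧ "1" ∈ db)) ∧
     (("2" ∈ da ∧ "5" ∈ db) ∨ ("5" ∈ da ∧ "2" ∈ db)) ∧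
     (("3" ∈ da ∧ ("9" ∈ db ∨ "6" ∈ db)) ∨ (("9" ∈ da ∨ "6" ∈ da) ∧ "3" ∈ db)) ∧
     (("4" ∈ da ∧ ("9" ∈ db ∨ "6" ∈ db)) ∨ (("9" ∈ da ∨ "6" ∈ da) ∧ "4" ∈ db)) ∧
     (("4" ∈ da ∧ ("9" ∈ db ∨ "6" ∈ db)) ∨ (("9" ∈ da ∨ "6" ∈ da) ∧ "4" ∈ db)) ∧
     (("8" ∈ da ∧ "1" ∈ db) ∨ ("1" ∈ da ∧ "8" ∈ db))) := by
  have hall : allSquaresB = [0, 1, 2, 3, 4, 5, 6, 7, 8] := by decide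
  simp only [can_do_the_thing_alt, PySem.Set.equal_iff, hall]
  have hmem : ∀ i : Int,
      (i ∈ (normB da).foldl (fun covered x =>
        (normB db).foldl (fun covered y =>
          PySem.Set.union covered (PySem.Dict.getD pairSquaresB (x, y) [])) covered)
        PySem.Set.empty) ↔ ∃ x ∈ normB da, ∃ y ∈ normB db, hits i x y := by
    intro i
    rw [outer_mem]
    simp [PySem.Set.empty]
  have c0 : (∃ x ∈ normB da, ∃ y ∈ normB db, hits 0 x y) ↔ (("0" ∈ da ∧ "1" ∈ db) ∨ ("1" ∈ da ∧ "0" ∈ db)) := by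
    simp only [hits, hits0]
    rw [split2 (normB da) (normB db) (fun z => z = "0") (fun z => z = "1")]
    simp only [exists_eq_right]
    rw [mem_norm da "0" (by decide) (by decide) (by decide), mem_norm db "1" (by decide) (by decide) (by decide), mem_norm da "1" (by decide) (by decide) (by decide), mem_norm db "0" (by decide) (by decide) (by decide)]
  have c1 : (∃ x ∈ normB da, ∃ y ∈ normB db, hits 1 x y) ↔ (("0" ∈ da ∧ "4" ∈ db) ∨ ("4" ∈ da ∧ "0" ∈ db)) := by
    simp only [hits, hits1]
    rw [split2 (normB da) (normB db) (fun z => z = "0") (fun z => z = "4")]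
    simp only [exists_eq_right]
    rw [mem_norm da "0" (by decide) (by decide) (by decide), mem_norm db "4" (by decide) (by decide) (by decide), mem_norm da "4" (by decide) (by decide) (by decide), mem_norm db "0" (by decide) (by decide) (by decide)]
  have c2 : (∃ x ∈ normB da, ∃ y ∈ normB db, hits 2 x y) ↔ (("0" ∈ da ∧ ("9" ∈ db ∨ "6" ∈ db)) ∨ (("9" ∈ da ∨ "6" ∈ da) ∧ "0" ∈ db)) := by
    simp only [hits, hits2]
    rw [split2 (normB da) (normB db) (fun z => z = "0") (fun z => z = "6")]
    simp only [exists_eq_right]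
    rw [mem_norm da "0" (by decide) (by decide) (by decide), mem_norm_six db, mem_norm_six da, mem_norm db "0" (by decide) (by decide) (by decide)]
  have c3 : (∃ x ∈ normB da, ∃ y ∈ normB db, hits 3 x y) ↔ (("1" ∈ da ∧ ("9" ∈ db ∨ "6" ∈ db)) ∨ (("9" ∈ da ∨ "6" ∈ da) ∧ "1" ∈ db)) := by
    simp only [hits, hits3]
    rw [split2 (normB da) (normB db) (fun z => z = "1") (fun z => z = "6")]
    simp only [exists_eq_right]
    rw [mem_norm da "1" (by decide) (by decide) (by decide), mem_norm_six db, mem_norm_six da, mem_norm db "1" (by decide) (by decide) (by decide)]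
  have c4 : (∃ x ∈ normB da, ∃ y ∈ normB db, hits 4 x y) ↔ (("2" ∈ da ∧ "5" ∈ db) ∨ ("5" ∈ da ∧ "2" ∈ db)) := by
    simp only [hits, hits4]
    rw [split2 (normB da) (normB db) (fun z => z = "2") (fun z => z = "5")]
    simp only [exists_eq_right]
    rw [mem_norm da "2" (by decide) (by decide) (by decide), mem_norm db "5" (by decide) (by decide) (by decide), mem_norm da "5" (by decide) (by decide) (by decide), mem_norm db "2" (by decide) (by decide) (by decide)]
  have c5 : (∃ x ∈ normB da, ∃ y ∈ normB db, hits 5 x y) ↔ (("3" ∈ da ∧ ("9" ∈ db ∨ "6" ∈ db)) ∨ (("9" ∈ da ∨ "6" ∈ da) ∧ "3" ∈ db)) := by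
    simp only [hits, hits5]
    rw [split2 (normB da) (normB db) (fun z => z = "3") (fun z => z = "6")]
    simp only [exists_eq_right]
    rw [mem_norm da "3" (by decide) (by decide) (by decide), mem_norm_six db, mem_norm_six da, mem_norm db "3" (by decide) (by decide) (by decide)]
  have c6 : (∃ x ∈ normB da, ∃ y ∈ normB db, hits 6 x y) ↔ (("4" ∈ da ∧ ("9" ∈ db ∨ "6" ∈ db)) ∨ (("9" ∈ da ∨ "6" ∈ da) ∧ "4" ∈ db)) := by
    simp only [hits, hits6]
    rw [split2 (normB da) (normB db) (fun z => z = "4") (fun z => z = "6")]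
    simp only [exists_eq_right]
    rw [mem_norm da "4" (by decide) (by decide) (by decide), mem_norm_six db, mem_norm_six da, mem_norm db "4" (by decide) (by decide) (by decide)]
  have c7 : (∃ x ∈ normB da, ∃ y ∈ normB db, hits 7 x y) ↔ (("4" ∈ da ∧ ("9" ∈ db ∨ "6" ∈ db)) ∨ (("9" ∈ da ∨ "6" ∈ da) ∧ "4" ∈ db)) := by
    simp only [hits, hits7]
    rw [split2 (normB da) (normB db) (fun z => z = "4") (fun z => z = "6")]
    simp only [exists_eq_right]
    rw [mem_norm da "4" (by decide) (by decide) (by decide), mem_norm_six db, mem_norm_six da, mem_norm db "4" (by decide) (by decide) (by decide)]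
  have c8 : (∃ x ∈ normB da, ∃ y ∈ normB db, hits 8 x y) ↔ (("8" ∈ da ∧ "1" ∈ db) ∨ ("1" ∈ da ∧ "8" ∈ db)) := by
    simp only [hits, hits8]
    rw [split2 (normB da) (normB db) (fun z => z = "8") (fun z => z = "1")]
    simp only [exists_eq_right]
    rw [mem_norm da "8" (by decide) (by decide) (by decide), mem_norm db "1" (by decide) (by decide) (by decide), mem_norm da "1" (by decide) (by decide) (by decide), mem_norm db "8" (by decide) (by decide) (by decide)]
  constructor
  · intro h
    have hc : ∀ j : Int, j ∈ ([0, 1, 2, 3, 4, 5, 6, 7, 8] : List Int) →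
        ∃ x ∈ normB da, ∃ y ∈ normB db, hits j x y := fun j hj => (hmem j).mp ((h j).mpr hj)
    exact ⟨c0.mp (hc 0 (by decide)), c1.mp (hc 1 (by decide)), c2.mp (hc 2 (by decide)),
      c3.mp (hc 3 (by decide)), c4.mp (hc 4 (by decide)), c5.mp (hc 5 (by decide)),
      c6.mp (hc 6 (by decide)), c7.mp (hc 7 (by decide)), c8.mp (hc 8 (by decide))⟩
  · intro h i
    obtain ⟨h0, h1, h2, h3, h4, h5, h6, h7, h8⟩ := h
    rw [hmem i]
    constructor
    · rintro ⟨x, -, y, -, hx⟩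
      have hb := getD_pairs_sub _ i hx
      simp only [List.mem_cons, List.not_mem_nil, or_false]
      omega
    · intro hi
      have hcase : i = 0 ∨ i = 1 ∨ i = 2 ∨ i = 3 ∨ i = 4 ∨ i = 5 ∨ i = 6 ∨ i = 7 ∨ i = 8 := by
        simpa using hi
      rcases hcase with rfl | rfl | rfl | rfl | rfl | rfl | rfl | rfl | rfl
      · exact c0.mpr h0
      · exact c1.mpr h1
      · exact c2.mpr h2
      · exact c3.mpr h3
      · exact c4.mpr h4
      · exact c5.mpr h5
      · exact c6.mpr h6
      · exact c7.mpr h7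
      · exact c8.mpr h8

lemma main_eq (da db : List String) : can_do_the_thing da db = can_do_the_thing_alt da db := by
  rw [Bool.eq_iff_iff, A_iff, B_iff]
  exact and_congr Iff.rfl (and_congr Iff.rfl (and_congr Iff.rfl (and_congr Iff.rfl
    (and_congr Iff.rfl (and_congr Iff.rfl (and_congr Iff.rfl (and_congr or_comm Iff.rfl)))))))

-- ===== VERDICT (by name: the statement is the Claim_ definition above) =====
theorem can_do_the_thing_spec : Claim_equal_can_do_the_thing := by
  intro die_a die_b _
  simpa [Spec_can_do_the_thing] using main_eq die_a die_b
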